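-- pv_equiv track=rewrite | github.com/astronautas/rnn_route_planning | utils.py | split_list_at_value
-- ===== SOURCE A (Python) =====
-- def split_list_at_value(list, value):
--     new_list = []
--
--     for item in list:
--         if item == value:
--             new_list.append(item)
--             return new_list
--         else:
--             new_list.append(item)
--
--     return new_list
-- ===== SOURCE B (Python) =====
-- def split_list_at_value(list, value):
--     try:
--         i = list.index(value)
--         return list[:i + 1]
--     except ValueError:
--         return list[:]
-- ===== Notes on version B (the rewrite author's own statement) =====
-- stated objective: idiomatic
-- what changed: Replaces the incremental append-and-early-return loop with locate-then-slice: list.index(value) finds the first occurrence and a single slice list[:i+1] produces the result (full copy on ValueError).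
import Mathlib
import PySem

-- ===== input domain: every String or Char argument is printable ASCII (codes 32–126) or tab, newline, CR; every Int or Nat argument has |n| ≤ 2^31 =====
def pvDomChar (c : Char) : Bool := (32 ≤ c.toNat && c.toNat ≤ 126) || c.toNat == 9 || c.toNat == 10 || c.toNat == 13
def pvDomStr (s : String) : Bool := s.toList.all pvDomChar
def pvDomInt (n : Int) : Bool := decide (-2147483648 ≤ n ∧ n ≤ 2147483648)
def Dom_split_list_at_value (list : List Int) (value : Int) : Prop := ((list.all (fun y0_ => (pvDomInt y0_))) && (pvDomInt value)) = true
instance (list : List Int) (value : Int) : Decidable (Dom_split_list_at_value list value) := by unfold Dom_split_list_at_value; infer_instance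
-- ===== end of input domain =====

-- B replaces A's append-and-early-return loop with an idiomatic locate-then-slice (index + list[:i+1]).

-- ===== PORT A =====
-- A's loop: append each item to new_list, returning as soon as the item equals value.
def splitGoA (value : Int) (acc : List Int) : List Int → List Int
  | [] => acc
  | x :: xs => if x = value then acc ++ [x] else splitGoA value (acc ++ [x]) xs

def split_list_at_value (list : List Int) (value : Int) : List Int :=
  splitGoA value [] list

-- ===== PORT B =====
def split_list_at_value_alt (list : List Int) (value : Int) : List Int :=
  match PySem.List.index? list value with
  | some i => PySem.List.slice list none (some ((i : Int) + 1))   -- list[:i+1]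
  | none   => PySem.List.slice list none none                     -- list[:]

-- ===== PRECONDITION & SPEC =====
def Spec_split_list_at_value (list : List Int) (value : Int) (out : List Int) : Prop := out = split_list_at_value_alt list value
instance (list : List Int) (value : Int) (out : List Int) : Decidable (Spec_split_list_at_value list value out) := by unfold Spec_split_list_at_value; infer_instance

-- ===== CLAIM (what is proved, stated in full; the proofs are below) =====
def Claim_equal_split_list_at_value : Prop := ∀ (list : List Int) (value : Int), Dom_split_list_at_value list value → Spec_split_list_at_value list value (split_list_at_value list value)

-- ===== LEMMAS AND PROOFS =====

theorem alt_cons_of_ne {x v : Int} (xs : List Int) (h : x ≠ v) :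
    split_list_at_value_alt (x :: xs) v = x :: split_list_at_value_alt xs v := by
  unfold split_list_at_value_alt
  rw [PySem.List.index?_cons_of_ne xs h]
  cases hidx : PySem.List.index? xs v with
  | none => simp [PySem.List.slice_none_none]
  | some i =>
      simp only [Option.map_some]
      have h1 : (((i + 1 : Nat) : Int) + 1) = (((i + 2 : Nat) : Int)) := by push_cast; ring
      have h2 : ((i : Int) + 1) = (((i + 1 : Nat) : Int)) := by push_cast; ring
      rw [h1, h2, PySem.List.slice_to_natCast, PySem.List.slice_to_natCast]
      simp [List.take_succ_cons]

theorem splitGoA_eq (value : Int) (xs : List Int) : ∀ acc : List Int,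
    splitGoA value acc xs = acc ++ split_list_at_value_alt xs value := by
  induction xs with
  | nil => intro acc; simp [splitGoA, split_list_at_value_alt, PySem.List.index?,
      PySem.List.slice_none_none]
  | cons x xs ih =>
      intro acc
      by_cases hx : x = value
      · subst hx
        unfold splitGoA split_list_at_value_alt
        rw [if_pos rfl, PySem.List.index?_cons_self]
        show acc ++ [x] = acc ++ PySem.List.slice (x :: xs) none (some (((0 : Nat) : Int) + 1))
        rw [show ((0 : Nat) : Int) + 1 = (((1 : Nat) : Int)) by norm_num,
          PySem.List.slice_to_natCast]
        simp
      · rw [alt_cons_of_ne xs hx]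
        simp only [splitGoA, if_neg hx, ih]
        simp

-- ===== VERDICT (by name: the statement is the Claim_ definition above) =====
theorem split_list_at_value_spec : Claim_equal_split_list_at_value := by
  intro list value _
  unfold Spec_split_list_at_value split_list_at_value
  simpa using splitGoA_eq value list []
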